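-- pv_equiv track=rewrite | github.com/LiyuanLucasLiu/LM-LSTM-CRF | model/utils.py | encode_corpus_c
-- ===== SOURCE A (Python) =====
-- def encode2char_safe(input_lines, char_dict):
--     """
--     get char representation of lines
--
--     args:
--         input_lines (list of strings) : input corpus
--         char_dict (dictionary) : char-level dictionary
--     return:
--         forw_lines
--     """
--     unk = char_dict['<u>']
--     forw_lines = [list(map(lambda m: list(map(lambda t: char_dict.get(t, unk), m)), line)) for line in input_lines]
--     return forw_lines
--
-- def encode_safe(input_lines, word_dict, unk):
--     """
--     encode list of strings into word-level representation with unk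
--     """
--     lines = list(map(lambda t: list(map(lambda m: word_dict.get(m, unk), t)), input_lines))
--     return lines
--
-- def encode(input_lines, word_dict):
--     """
--     encode list of strings into word-level representation
--     """
--     lines = list(map(lambda t: list(map(lambda m: word_dict[m], t)), input_lines))
--     return lines
--
-- def encode_corpus_c(lines, f_map, l_map, c_map):
--     """
--     encode corpus into features (both word-level and char-level) and labels
--     """
--     tmp_fl = []
--     tmp_ll = []
--     features = []
--     labels = []
--     for line in lines:
--         if not (line.isspace() or (len(line) > 10 and line[0:10] == '-DOCSTART-')):
--             line = line.rstrip('\n').split()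
--             tmp_fl.append(line[0])
--             tmp_ll.append(line[-1])
--         elif len(tmp_fl) > 0:
--             features.append(tmp_fl)
--             labels.append(tmp_ll)
--             tmp_fl = list()
--             tmp_ll = list()
--     if len(tmp_fl) > 0:
--         features.append(tmp_fl)
--         labels.append(tmp_ll)
--
--     feature_c = encode2char_safe(features, c_map)
--     feature_e = encode_safe(features, f_map, f_map['<unk>'])
--     label_e = encode(labels, l_map)
--     return feature_c, feature_e, label_e
-- ===== SOURCE B (Python) =====
-- def _sep(line):
--     return line.isspace() or (len(line) > 10 and line[0:10] == '-DOCSTART-')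
--
-- def _groups(lines):
--     """split lines into maximal runs of non-separator lines"""
--     groups = []
--     i, n = 0, len(lines)
--     while i < n:
--         if _sep(lines[i]):
--             i += 1
--         else:
--             j = i + 1
--             while j < n and not _sep(lines[j]):
--                 j += 1
--             groups.append(lines[i:j])
--             i = j
--     return groups
--
-- def encode_corpus_c(lines, f_map, l_map, c_map):
--     """
--     encode corpus into features (both word-level and char-level) and labels
--     """
--     sents = [[l.rstrip('\n').split() for l in g] for g in _groups(lines)]
--     features = [[t[0] for t in s] for s in sents]
--     labels = [[t[-1] for t in s] for s in sents]
--     c_unk = c_map['<u>']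
--     w_unk = f_map['<unk>']
--     feature_c = [[[c_map.get(t, c_unk) for t in w] for w in s] for s in features]
--     feature_e = [[f_map.get(w, w_unk) for w in s] for s in features]
--     label_e = [[l_map[w] for w in s] for s in labels]
--     return feature_c, feature_e, label_e
-- ===== Notes on version B (the rewrite author's own statement) =====
-- stated objective: idiomatic
-- what changed: Replaces A's accumulator-and-flush state machine (tmp lists flushed on separators and once more after the loop) with a run-grouping pass that splits the lines into maximal non-separator runs and then builds features/labels and the three encodings as per-group comprehensions.
import Mathlib
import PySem

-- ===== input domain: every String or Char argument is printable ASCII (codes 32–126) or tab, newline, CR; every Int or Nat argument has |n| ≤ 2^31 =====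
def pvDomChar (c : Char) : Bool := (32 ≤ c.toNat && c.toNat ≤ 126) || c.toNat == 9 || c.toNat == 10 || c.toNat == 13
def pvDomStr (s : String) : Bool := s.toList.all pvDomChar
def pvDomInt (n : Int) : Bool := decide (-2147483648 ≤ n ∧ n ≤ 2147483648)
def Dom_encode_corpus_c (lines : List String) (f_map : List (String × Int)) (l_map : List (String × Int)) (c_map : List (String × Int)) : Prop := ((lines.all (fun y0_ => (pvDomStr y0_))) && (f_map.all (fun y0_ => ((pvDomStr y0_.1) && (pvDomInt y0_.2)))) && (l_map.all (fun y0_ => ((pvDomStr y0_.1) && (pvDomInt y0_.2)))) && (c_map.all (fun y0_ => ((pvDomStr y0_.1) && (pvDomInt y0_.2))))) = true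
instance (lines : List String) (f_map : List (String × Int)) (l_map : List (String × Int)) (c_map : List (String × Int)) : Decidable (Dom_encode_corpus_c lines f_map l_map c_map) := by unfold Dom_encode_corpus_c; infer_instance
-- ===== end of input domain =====

-- B replaces A's accumulate-and-flush loop by a run-grouping pass (split lines into maximal
-- non-separator runs, then map over the runs) with the three encodings inlined as comprehensions.


-- shared low-level primitives (dict lookup = first match on the association list; rstrip('\n'))
def pvLookup? (m : List (String × Int)) (k : String) : Option Int :=
  (m.find? (fun p => p.1 == k)).map (·.2)

def pvLookupD (m : List (String × Int)) (k : String) (d : Int) : Int :=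
  (pvLookup? m k).getD d

def pvRstripNL (s : String) : String :=
  String.ofList ((s.toList.reverse.dropWhile (· == '\n')).reverse)

-- the separator test 'line.isspace() or (len(line) > 10 and line[0:10] == "-DOCSTART-")'
def pvSep (line : String) : Bool :=
  PySem.Str.strIsspace line ||
    (decide (10 < PySem.Str.len line) && (PySem.Str.slice line (some 0) (some 10) == "-DOCSTART-"))

-- ===== PORT A =====
def encode2char_safe (input_lines : List (List String)) (char_dict : List (String × Int)) : List (List (List Int)) :=
  let unk := pvLookupD char_dict "<u>" 0   -- char_dict['<u>'] : Pre_ guarantees presence, default unused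
  input_lines.map (fun line => line.map (fun m => m.toList.map (fun t => pvLookupD char_dict (String.ofList [t]) unk)))

def encode_safe (input_lines : List (List String)) (word_dict : List (String × Int)) (unk : Int) : List (List Int) :=
  input_lines.map (fun t => t.map (fun m => pvLookupD word_dict m unk))

def encode (input_lines : List (List String)) (word_dict : List (String × Int)) : List (List Int) :=
  input_lines.map (fun t => t.map (fun m => pvLookupD word_dict m 0))   -- word_dict[m] : Pre_ guarantees presence

-- A's loop body: state (tmp_fl, tmp_ll, features, labels)
def pvStepA (st : List String × List String × List (List String) × List (List String)) (line : String) : List String × List String × List (List String) × List (List String) :=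
  if !pvSep line then
    let t := PySem.Str.split₀ (pvRstripNL line)   -- line.rstrip('\n').split(); t[0] / t[-1] under Pre_
    (st.1 ++ [PySem.List.pyGetD t 0 ""], st.2.1 ++ [PySem.List.pyGetD t (-1) ""], st.2.2.1, st.2.2.2)
  else if decide (0 < st.1.length) then
    ([], [], st.2.2.1 ++ [st.1], st.2.2.2 ++ [st.2.1])
  else st

-- the final 'if len(tmp_fl) > 0: append' flush
def pvFlush (st : List String × List String × List (List String) × List (List String)) : List (List String) × List (List String) :=
  (if decide (0 < st.1.length) then st.2.2.1 ++ [st.1] else st.2.2.1,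
   if decide (0 < st.1.length) then st.2.2.2 ++ [st.2.1] else st.2.2.2)

def encode_corpus_c (lines : List String) (f_map : List (String × Int)) (l_map : List (String × Int)) (c_map : List (String × Int)) : List (List (List Int)) × List (List Int) × List (List Int) :=
  let fl := pvFlush (lines.foldl pvStepA ([], [], [], []))
  (encode2char_safe fl.1 c_map, encode_safe fl.1 f_map (pvLookupD f_map "<unk>" 0), encode fl.2 l_map)

-- ===== PORT B =====
-- maximal runs of non-separator lines (the grouping scan of Source B's _groups)
def pvGroups : List String → List (List String)
  | [] => []
  | l :: rest =>
    if pvSep l then pvGroups rest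
    else (l :: rest.takeWhile (fun s => !pvSep s)) :: pvGroups (rest.dropWhile (fun s => !pvSep s))
termination_by lines => lines.length
decreasing_by
  · simp
  · simp; exact List.length_dropWhile_le _ _

def encode_corpus_c_alt (lines : List String) (f_map : List (String × Int)) (l_map : List (String × Int)) (c_map : List (String × Int)) : List (List (List Int)) × List (List Int) × List (List Int) :=
  let sents := (pvGroups lines).map (fun g => g.map (fun l => PySem.Str.split₀ (pvRstripNL l)))
  let features := sents.map (fun s => s.map (fun t => PySem.List.pyGetD t 0 ""))
  let labels := sents.map (fun s => s.map (fun t => PySem.List.pyGetD t (-1) ""))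
  let c_unk := pvLookupD c_map "<u>" 0
  let w_unk := pvLookupD f_map "<unk>" 0
  let feature_c := features.map (fun s => s.map (fun w => w.toList.map (fun t => pvLookupD c_map (String.ofList [t]) c_unk)))
  let feature_e := features.map (fun s => s.map (fun w => pvLookupD f_map w w_unk))
  let label_e := labels.map (fun s => s.map (fun w => pvLookupD l_map w 0))
  (feature_c, feature_e, label_e)

-- ===== PRECONDITION & SPEC =====
-- Pre_ excludes exactly the inputs where the Python A raises: a non-separator line with no
-- whitespace-separated token (only the empty string; line.split()[0] is an IndexError), a
-- missing '<u>' key in c_map or '<unk>' key in f_map, and a content line whose last token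
-- is not a key of l_map (KeyError).
def Pre_encode_corpus_c (lines : List String) (f_map : List (String × Int)) (l_map : List (String × Int)) (c_map : List (String × Int)) : Prop :=
  (pvLookup? c_map "<u>").isSome = true ∧ (pvLookup? f_map "<unk>").isSome = true ∧
  ∀ line ∈ lines, pvSep line = false →
    ((PySem.Str.split₀ (pvRstripNL line)).getLast?.any (fun lab => (pvLookup? l_map lab).isSome)) = true
instance (lines : List String) (f_map : List (String × Int)) (l_map : List (String × Int)) (c_map : List (String × Int)) : Decidable (Pre_encode_corpus_c lines f_map l_map c_map) := by unfold Pre_encode_corpus_c; infer_instance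

def pvWitness_encode_corpus_c : List String × (List (String × Int)) × (List (String × Int)) × (List (String × Int)) :=
  (["hi O", " ", "yo B"], [("<unk>", 0), ("hi", 1)], [("O", 2), ("B", 3)], [("<u>", 4), ("h", 5)])

def Spec_encode_corpus_c (lines : List String) (f_map : List (String × Int)) (l_map : List (String × Int)) (c_map : List (String × Int)) (out : List (List (List Int)) × List (List Int) × List (List Int)) : Prop := out = encode_corpus_c_alt lines f_map l_map c_map
instance (lines : List String) (f_map : List (String × Int)) (l_map : List (String × Int)) (c_map : List (String × Int)) (out : List (List (List Int)) × List (List Int) × List (List Int)) : Decidable (Spec_encode_corpus_c lines f_map l_map c_map out) := by unfold Spec_encode_corpus_c; infer_instance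

-- ===== CLAIM (what is proved, stated in full; the proofs are below) =====
def Claim_equal_encode_corpus_c : Prop := ∀ (lines : List String) (f_map : List (String × Int)) (l_map : List (String × Int)) (c_map : List (String × Int)), Dom_encode_corpus_c lines f_map l_map c_map → Pre_encode_corpus_c lines f_map l_map c_map → Spec_encode_corpus_c lines f_map l_map c_map (encode_corpus_c lines f_map l_map c_map)

-- ===== LEMMAS AND PROOFS =====

-- first and last token of a line, as A stores them
def pvFst (l : String) : String := PySem.List.pyGetD (PySem.Str.split₀ (pvRstripNL l)) 0 ""
def pvLst (l : String) : String := PySem.List.pyGetD (PySem.Str.split₀ (pvRstripNL l)) (-1) ""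

-- A's loop rephrased tail-recursively: (features, labels) after the run, including the final flush
def pvGoF (tfl tll : List String) : List String → List (List String) × List (List String)
  | [] => (if decide (0 < tfl.length) then [tfl] else [], if decide (0 < tfl.length) then [tll] else [])
  | l :: rest =>
    if !pvSep l then pvGoF (tfl ++ [pvFst l]) (tll ++ [pvLst l]) rest
    else if decide (0 < tfl.length) then
      (tfl :: (pvGoF [] [] rest).1, tll :: (pvGoF [] [] rest).2)
    else pvGoF tfl tll rest

theorem pvLoop_eq (lines : List String) : ∀ (tfl tll : List String) (fs ls : List (List String)),
    pvFlush (lines.foldl pvStepA (tfl, tll, fs, ls)) =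
      (fs ++ (pvGoF tfl tll lines).1, ls ++ (pvGoF tfl tll lines).2) := by
  induction lines with
  | nil =>
    intro tfl tll fs ls
    simp only [List.foldl_nil, pvFlush, pvGoF]
    split_ifs <;> simp_all
  | cons l rest ih =>
    intro tfl tll fs ls
    simp only [List.foldl_cons, pvGoF]
    by_cases h : pvSep l
    · by_cases h2 : 0 < tfl.length
      · simp [pvStepA, h, h2, ih]
      · simp [pvStepA, h, h2, ih]
    · simp [pvStepA, h, ih, pvFst, pvLst]

theorem pvGoF_groups (lines : List String) :
    pvGoF [] [] lines = ((pvGroups lines).map (List.map pvFst), (pvGroups lines).map (List.map pvLst)) ∧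
    (∀ tfl tll : List String, tfl ≠ [] →
      pvGoF tfl tll lines =
        ((tfl ++ (lines.takeWhile (fun s => !pvSep s)).map pvFst) ::
            (pvGroups (lines.dropWhile (fun s => !pvSep s))).map (List.map pvFst),
         (tll ++ (lines.takeWhile (fun s => !pvSep s)).map pvLst) ::
            (pvGroups (lines.dropWhile (fun s => !pvSep s))).map (List.map pvLst))) := by
  induction lines with
  | nil =>
    constructor
    · simp [pvGoF, pvGroups]
    · intro tfl tll h
      simp [pvGoF, pvGroups, List.length_pos_iff, h]
  | cons l rest ih =>
    obtain ⟨ih1, ih2⟩ := ih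
    by_cases h : pvSep l
    · constructor
      · simp [pvGoF, h, pvGroups, ih1]
      · intro tfl tll hne
        simp [pvGoF, h, pvGroups, List.length_pos_iff, hne, ih1]
    · constructor
      · rw [show pvGoF [] [] (l :: rest) = pvGoF [pvFst l] [pvLst l] rest by simp [pvGoF, h]]
        rw [ih2 [pvFst l] [pvLst l] (by simp)]
        simp [pvGroups, h]
      · intro tfl tll hne
        rw [show pvGoF tfl tll (l :: rest) = pvGoF (tfl ++ [pvFst l]) (tll ++ [pvLst l]) rest by simp [pvGoF, h]]
        rw [ih2 _ _ (by simp)]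
        simp [h]

-- ===== VERDICT (by name: the statement is the Claim_ definition above) =====
theorem encode_corpus_c_spec : Claim_equal_encode_corpus_c := by
  intro lines f_map l_map c_map _ _
  unfold Spec_encode_corpus_c encode_corpus_c encode_corpus_c_alt encode2char_safe encode_safe encode
  rw [pvLoop_eq lines [] [] [] [], (pvGoF_groups lines).1]
  simp [List.map_map, Function.comp, pvFst, pvLst]
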